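-- pv_equiv track=rewrite | github.com/LibreOffice/core | odk/source/helper/addon_console.py | generate_images_fragment
-- ===== SOURCE A (Python) =====
-- def generate_images_fragment(image_small, image_big, image_small_hc, image_big_hc):
--     return ''.join(x for x in [
--         '<node oor:name="Images" oor:op="replace">',
--         f'<prop oor:name="ImageSmall"><value>{image_small}</value></prop>' if image_small else '',
--         f'<prop oor:name="ImageBig"><value>{image_big}</value></prop>' if image_big else '',
--         f'<prop oor:name="ImageSmallHC"><value>{image_small_hc}</value></prop>' if image_small_hc else '',
--         f'<prop oor:name="ImageBigHC"><value>{image_big_hc}</value></prop>' if image_big_hc else '',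
--         '</node>'
--     ] if x)
-- ===== SOURCE B (Python) =====
-- def generate_images_fragment(image_small, image_big, image_small_hc, image_big_hc):
--     def rec(pairs):
--         # build the tail of the fragment back-to-front by recursion;
--         # base case is the closing tag, each step prepends one property if set
--         if not pairs:
--             return '</node>'
--         (name, value), rest = pairs[0], pairs[1:]
--         tail = rec(rest)
--         if value:
--             return f'<prop oor:name="{name}"><value>{value}</value></prop>' + tail
--         return tail
--     return '<node oor:name="Images" oor:op="replace">' + rec([
--         ('ImageSmall', image_small),
--         ('ImageBig', image_big),
--         ('ImageSmallHC', image_small_hc),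
--         ('ImageBigHC', image_big_hc),
--     ])
-- ===== Notes on version B (the rewrite author's own statement) =====
-- stated objective: alternative
-- what changed: Replaces A's build-a-list-of-six-conditional-strings-then-filter-and-join with a recursive back-to-front construction: a recursion over (name, value) pairs whose base case is the closing tag and whose step prepends one property template when the value is truthy; no list of fragments and no join.
import Mathlib
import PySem

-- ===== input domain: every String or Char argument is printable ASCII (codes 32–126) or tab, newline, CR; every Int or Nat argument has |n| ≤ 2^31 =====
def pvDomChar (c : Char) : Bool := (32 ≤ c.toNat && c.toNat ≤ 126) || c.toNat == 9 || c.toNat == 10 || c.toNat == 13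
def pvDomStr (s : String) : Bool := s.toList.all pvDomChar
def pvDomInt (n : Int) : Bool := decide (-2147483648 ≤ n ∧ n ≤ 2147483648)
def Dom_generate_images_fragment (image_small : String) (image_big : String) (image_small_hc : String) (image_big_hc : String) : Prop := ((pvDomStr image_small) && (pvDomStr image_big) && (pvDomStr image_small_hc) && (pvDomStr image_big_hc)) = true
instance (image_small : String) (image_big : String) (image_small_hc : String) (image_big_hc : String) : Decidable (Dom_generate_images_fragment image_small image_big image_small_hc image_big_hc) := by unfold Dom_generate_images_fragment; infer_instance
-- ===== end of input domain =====

-- B builds the fragment by recursion over (name,value) pairs, prepending each property to the recursively built tail (base case = closing tag), instead of A's filter-and-join over a literal list (objective: alternative); same result, same cost.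


-- ===== PORT A =====
-- Port of A: literal list of six conditionally-empty strings, keep the truthy ones, join.
def generate_images_fragment (image_small : String) (image_big : String) (image_small_hc : String) (image_big_hc : String) : String :=
  String.join (([
    "<node oor:name=\"Images\" oor:op=\"replace\">",
    (if image_small ≠ "" then "<prop oor:name=\"ImageSmall\"><value>" ++ image_small ++ "</value></prop>" else ""),
    (if image_big ≠ "" then "<prop oor:name=\"ImageBig\"><value>" ++ image_big ++ "</value></prop>" else ""),
    (if image_small_hc ≠ "" then "<prop oor:name=\"ImageSmallHC\"><value>" ++ image_small_hc ++ "</value></prop>" else ""),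
    (if image_big_hc ≠ "" then "<prop oor:name=\"ImageBigHC\"><value>" ++ image_big_hc ++ "</value></prop>" else ""),
    "</node>"
  ] : List String).filter (fun x => x ≠ ""))

-- ===== PORT B =====
-- Port of B: recursion over (name, value) pairs, base case the closing tag, prepending a property when the value is truthy.
def genImagesRec : List (String × String) → String
  | [] => "</node>"
  | (name, value) :: rest =>
    let tail := genImagesRec rest
    if value ≠ "" then
      "<prop oor:name=\"" ++ name ++ "\"><value>" ++ value ++ "</value></prop>" ++ tail
    else tail

def generate_images_fragment_alt (image_small : String) (image_big : String) (image_small_hc : String) (image_big_hc : String) : String :=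
  "<node oor:name=\"Images\" oor:op=\"replace\">" ++ genImagesRec
    [("ImageSmall", image_small), ("ImageBig", image_big),
     ("ImageSmallHC", image_small_hc), ("ImageBigHC", image_big_hc)]

-- ===== PRECONDITION & SPEC =====
def Spec_generate_images_fragment (image_small : String) (image_big : String) (image_small_hc : String) (image_big_hc : String) (out : String) : Prop := out = generate_images_fragment_alt image_small image_big image_small_hc image_big_hc
instance (image_small : String) (image_big : String) (image_small_hc : String) (image_big_hc : String) (out : String) : Decidable (Spec_generate_images_fragment image_small image_big image_small_hc image_big_hc out) := by unfold Spec_generate_images_fragment; infer_instance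

-- ===== CLAIM =====
def Claim_equal_generate_images_fragment : Prop := ∀ (image_small : String) (image_big : String) (image_small_hc : String) (image_big_hc : String), Dom_generate_images_fragment image_small image_big image_small_hc image_big_hc → Spec_generate_images_fragment image_small image_big image_small_hc image_big_hc (generate_images_fragment image_small image_big image_small_hc image_big_hc)

-- ===== LEMMAS AND PROOFS =====

-- ===== VERDICT =====
theorem generate_images_fragment_spec : Claim_equal_generate_images_fragment := by
  intro s b sh bh _
  unfold Spec_generate_images_fragment generate_images_fragment generate_images_fragment_alt
  by_cases h1 : s = "" <;> by_cases h2 : b = "" <;> by_cases h3 : sh = "" <;> by_cases h4 : bh = "" <;>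
    simp [h1, h2, h3, h4, String.join, List.filter, genImagesRec, String.append_assoc]
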